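-- pv_equiv track=rewrite | github.com/LukasErekson/budget-books-backend | tests/testing_utils.py | partial_dict_list_match
-- ===== SOURCE A (Python) =====
-- def partial_dict_match(compare_dict: dict, target_dict: dict) -> bool:
--     """Determine whether the given dictionary partially matches the
--     target dictionary by verifying that all the keys in compare_dict
--     are in target_dict and they have the same values.
--
--     This can somewhat be thought of as a subset comparison for dicts, or
--     if target_dict "contains" compare_dict.
--
--     Paramters
--     ---------
--         compare_dict (dict) : The dictionary that we want to verify is
--             completely contained in target_dict.
--         target_dict (dict): The dictionary that we would expect
--             compare_dict to be "inside" of.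
--
--     Returns
--     -------
--         (bool) : True if all of compare_dict's keys and their values are
--             present in target_dict, otherwise False.
--
--     Example
--     -------
--         >> dict_a = {'1': 1, '2': 2}
--         >> dict_b = {'1': 1, '2': 2, '3': 3}
--         >> dict_c = {'1': 2}
--         >> dict_d = {'4': 4}
--         >>
--         >> partial_dict_match(dict_a, dict_b) # True
--         >> partial_dict_match(dict_c, dict_b) # False
--         >> partial_dict_match(dict_d, dict_b) # False
--         >> partial_dict_match(dict_b, dict_a) # False
--     """
--     for key, value in compare_dict.items():
--         if key not in target_dict:
--             return False
--
--         if value != target_dict[key]: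
--             return False
--
--     return True
--
-- def partial_dict_list_match(
--     compare_dict_list: list[dict], target_dict_list: list[dict]
-- ) -> bool:
--     """Determine whether each dictionary in the given list partially
--     matches a target dictionary in the target list by verifying that all
--     the keys in the first dict are in target_dict and they have the same
--     values.
--
--     This can somewhat be thought of as a subset comparison for dicts, or
--     if target_dict_list "contains" a partial copy of each dict in
--     compare_dict_list.
--
--     Paramters
--     ---------
--         compare_dict (dict) : The dictionary that we want to verify is
--             completely contained in target_dict.
--         target_dict (dict): The dictionary that we would expect
--             compare_dict to be "inside" of.
--
--     Returns
--     -------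
--         (bool) : True if all of compare_dict's keys and their values are
--             present in target_dict, otherwise False.
--     """
--     for compare_dict in compare_dict_list:
--         if not any(
--             [
--                 partial_dict_match(compare_dict, target_dict)
--                 for target_dict in target_dict_list
--             ]
--         ):
--             return False
--
--     return True
-- ===== SOURCE B (Python) =====
-- def _merge_subset(c_items, t_items):
--     """Two-pointer merge over key-sorted item lists: every (key, value) of
--     c_items must be found in t_items (keys unique in t_items)."""
--     j = 0
--     for ck, cv in c_items:
--         while j < len(t_items) and t_items[j][0] < ck:
--             j += 1
--         if j == len(t_items) or t_items[j][0] != ck or t_items[j][1] != cv: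
--             return False
--     return True
--
--
-- def partial_dict_list_match(
--     compare_dict_list: list[dict], target_dict_list: list[dict]
-- ) -> bool:
--     # canonicalise every dict once as a key-sorted item list, then decide
--     # containment by a linear two-pointer merge instead of per-key lookups
--     sorted_targets = [sorted(t.items(), key=lambda kv: kv[0]) for t in target_dict_list]
--     return all(
--         any(_merge_subset(sorted(c.items(), key=lambda kv: kv[0]), st) for st in sorted_targets)
--         for c in compare_dict_list
--     )
-- ===== Notes on version B (the rewrite author's own statement) =====
-- stated objective: alternative
-- what changed: Each dict is canonicalised once into a key-sorted item list and containment is decided by a linear two-pointer merge over the two sorted lists, replacing A's per-key membership-test-plus-lookup loop; the targets are sorted once up front instead of being rescanned per compare dict.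
import Mathlib
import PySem

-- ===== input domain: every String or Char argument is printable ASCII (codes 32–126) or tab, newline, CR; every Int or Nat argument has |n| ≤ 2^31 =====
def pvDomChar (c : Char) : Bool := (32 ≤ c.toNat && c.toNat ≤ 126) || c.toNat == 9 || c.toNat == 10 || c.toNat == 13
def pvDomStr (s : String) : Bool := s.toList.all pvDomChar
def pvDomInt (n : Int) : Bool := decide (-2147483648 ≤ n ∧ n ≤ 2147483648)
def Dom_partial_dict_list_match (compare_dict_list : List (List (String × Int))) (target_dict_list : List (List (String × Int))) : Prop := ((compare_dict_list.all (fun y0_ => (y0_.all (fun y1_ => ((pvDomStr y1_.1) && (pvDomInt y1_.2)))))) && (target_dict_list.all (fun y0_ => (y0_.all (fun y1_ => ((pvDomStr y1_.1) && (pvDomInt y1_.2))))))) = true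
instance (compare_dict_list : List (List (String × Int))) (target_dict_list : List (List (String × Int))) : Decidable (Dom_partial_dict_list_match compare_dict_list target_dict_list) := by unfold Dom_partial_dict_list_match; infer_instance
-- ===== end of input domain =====

-- B canonicalises every dict once as a key-sorted item list and decides containment
-- by a linear two-pointer merge over the sorted lists, instead of A's per-key
-- membership-test-plus-lookup loop (alternative algorithm, similar cost).

-- ===== PORT A =====
-- helper partial_dict_match: loop over compare_dict.items() with two early returns
def partial_dict_match_A : List (String × Int) → List (String × Int) → Bool
  | [], _ => true
  | (k, v) :: rest, t =>
      match (PySem.Dict.mk t).get? k with   -- `key not in target_dict` / `target_dict[key]`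
      | none => false
      | some w => if v ≠ w then false else partial_dict_match_A rest t

def partial_dict_list_match (compare_dict_list : List (List (String × Int))) (target_dict_list : List (List (String × Int))) : Bool :=
  match compare_dict_list with
  | [] => true
  | c :: rest =>
      if !((target_dict_list.map (fun t => partial_dict_match_A c t)).any id) then false
      else partial_dict_list_match rest target_dict_list

-- ===== PORT B =====
-- _merge_subset: two-pointer merge over the key-sorted item lists (the outer `for`
-- over c_items and the inner `while` skipping small target keys become the recursion)
def mergeSubset : List (String × Int) → List (String × Int) → Bool
  | [], _ => true
  | _ :: _, [] => false
  | (ck, cv) :: cr, (tk, tv) :: tr =>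
      if tk < ck then mergeSubset ((ck, cv) :: cr) tr           -- inner while: j += 1
      else if tk ≠ ck ∨ tv ≠ cv then false                      -- mismatch: return False
      else mergeSubset cr ((tk, tv) :: tr)                      -- matched: i += 1
termination_by cs ts => cs.length + ts.length

-- sorted(d.items(), key=lambda kv: kv[0])
def sortItems (d : List (String × Int)) : List (String × Int) :=
  PySem.List.sorted d Prod.fst false

def partial_dict_list_match_alt (compare_dict_list : List (List (String × Int))) (target_dict_list : List (List (String × Int))) : Bool :=
  let sorted_targets := target_dict_list.map sortItems
  compare_dict_list.all (fun c => sorted_targets.any (fun st => mergeSubset (sortItems c) st))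

-- ===== PRECONDITION & SPEC =====
-- Pre_ excludes target association lists with duplicate keys: a Python dict cannot hold
-- duplicate keys, so such lists encode no Python input and lookup behaviour on them is
-- an artefact of the association-list encoding.
def Pre_partial_dict_list_match (compare_dict_list : List (List (String × Int))) (target_dict_list : List (List (String × Int))) : Prop :=
  ∀ d ∈ target_dict_list, (d.map Prod.fst).Nodup
instance (compare_dict_list : List (List (String × Int))) (target_dict_list : List (List (String × Int))) : Decidable (Pre_partial_dict_list_match compare_dict_list target_dict_list) := by unfold Pre_partial_dict_list_match; infer_instance

def pvWitness_partial_dict_list_match : (List (List (String × Int))) × (List (List (String × Int))) :=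
  ([[("a", 1)]], [[("a", 1), ("b", 2)]])

def Spec_partial_dict_list_match (compare_dict_list : List (List (String × Int))) (target_dict_list : List (List (String × Int))) (out : Bool) : Prop := out = partial_dict_list_match_alt compare_dict_list target_dict_list
instance (compare_dict_list : List (List (String × Int))) (target_dict_list : List (List (String × Int))) (out : Bool) : Decidable (Spec_partial_dict_list_match compare_dict_list target_dict_list out) := by unfold Spec_partial_dict_list_match; infer_instance

-- ===== CLAIM (what is proved, stated in full; the proofs are below) =====
def Claim_equal_partial_dict_list_match : Prop := ∀ (compare_dict_list : List (List (String × Int))) (target_dict_list : List (List (String × Int))), Dom_partial_dict_list_match compare_dict_list target_dict_list → Pre_partial_dict_list_match compare_dict_list target_dict_list → Spec_partial_dict_list_match compare_dict_list target_dict_list (partial_dict_list_match compare_dict_list target_dict_list)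

-- ===== LEMMAS AND PROOFS =====

-- A's helper loop, on a duplicate-free target, is the item-membership test.
theorem partial_dict_match_A_eq_all_contains (c t : List (String × Int)) (ht : (t.map Prod.fst).Nodup) :
    partial_dict_match_A c t = c.all (fun p => t.contains p) := by
  induction c with
  | nil => rfl
  | cons p rest ih =>
      obtain ⟨k, v⟩ := p
      have hknd : (PySem.Dict.mk t).keys.Nodup := ht
      have hiff := PySem.Dict.get?_eq_some_iff_mem_items (d := PySem.Dict.mk t) (k := k) (v := v) hknd
      simp only [partial_dict_match_A, List.all_cons]
      cases hg : (PySem.Dict.mk t).get? k with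
      | none =>
          have : ¬ (k, v) ∈ t := fun hm => by
            have h2 := hiff.mpr hm
            rw [hg] at h2; simp at h2
          simp [this]
      | some w =>
          by_cases hvw : v = w
          · subst hvw
            have hm : (k, v) ∈ t := hiff.mp hg
            simp [hm, ih]
          · have : ¬ (k, v) ∈ t := fun hm => by
              have h2 := hiff.mpr hm
              rw [hg] at h2
              exact hvw (Option.some.inj h2).symm
            simp [this, hvw]

-- The two-pointer merge on a key-ordered compare list and a strictly key-ordered
-- target list is the item-membership test.
theorem mergeSubset_eq_all_contains (cs ts : List (String × Int))
    (hcs : cs.Pairwise (fun a b => a.1 ≤ b.1)) (hts : ts.Pairwise (fun a b => a.1 < b.1)) :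
    mergeSubset cs ts = cs.all (fun p => ts.contains p) := by
  fun_induction mergeSubset cs ts with
  | case1 ts => simp
  | case2 p cr => simp
  | case3 ck cv cr tk tv tr hlt ih =>
      rw [ih hcs hts.tail, Bool.eq_iff_iff]
      simp only [List.all_eq_true, List.contains_iff_mem]
      constructor
      · intro h p hp
        exact List.mem_cons_of_mem _ (h p hp)
      · intro h p hp
        have hk : tk < p.1 := by
          rcases List.mem_cons.mp hp with hh | hh
          · rw [hh]; exact hlt
          · exact lt_of_lt_of_le hlt ((List.pairwise_cons.mp hcs).1 p hh)
        rcases List.mem_cons.mp (h p hp) with hh | hh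
        · rw [hh] at hk; exact absurd hk (lt_irrefl _)
        · exact hh
  | case4 ck cv cr tk tv tr hlt hne =>
      have htr : ∀ q ∈ tr, tk < q.1 := (List.pairwise_cons.mp hts).1
      have hhead : ¬ ((ck, cv) ∈ (tk, tv) :: tr) := by
        intro hm
        rcases List.mem_cons.mp hm with h | h
        · rcases hne with h1 | h1
          · exact h1 (congrArg Prod.fst h).symm
          · exact h1 (congrArg Prod.snd h).symm
        · have := htr _ h
          have hle : ck ≤ tk := le_of_not_gt hlt
          exact absurd this (not_lt_of_ge hle)
      have hc : ((tk, tv) :: tr).contains (ck, cv) = false := by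
        rw [Bool.eq_false_iff]
        intro hcc
        exact hhead (List.contains_iff_mem.mp hcc)
      simp only [List.all_cons, hc, Bool.false_and]
  | case5 ck cv cr tk tv tr hlt hne ih =>
      rcases not_or.mp hne with ⟨h1, h2⟩
      rw [not_not] at h1 h2
      rw [ih hcs.tail hts]
      have hc : ((tk, tv) :: tr).contains (ck, cv) = true := by
        rw [List.contains_iff_mem, h1, h2]
        exact List.mem_cons_self
      simp only [List.all_cons, hc, Bool.true_and]

-- Inner equivalence: A's helper equals B's sort-and-merge check.
theorem inner_eq (c t : List (String × Int)) (ht : (t.map Prod.fst).Nodup) :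
    partial_dict_match_A c t = mergeSubset (sortItems c) (sortItems t) := by
  have hpc : (sortItems c).Perm c := PySem.List.sorted_perm c Prod.fst false
  have hpt : (sortItems t).Perm t := PySem.List.sorted_perm t Prod.fst false
  have hcs : (sortItems c).Pairwise (fun a b => a.1 ≤ b.1) :=
    PySem.List.sorted_pairwise c Prod.fst
  have hts_le : (sortItems t).Pairwise (fun a b => a.1 ≤ b.1) :=
    PySem.List.sorted_pairwise t Prod.fst
  have hnd : ((sortItems t).map Prod.fst).Nodup := ((hpt.map Prod.fst).nodup_iff).mpr ht
  have hts_ne : (sortItems t).Pairwise (fun a b => a.1 ≠ b.1) := List.pairwise_map.mp hnd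
  have hts : (sortItems t).Pairwise (fun a b => a.1 < b.1) :=
    (hts_le.and hts_ne).imp (fun h => lt_of_le_of_ne h.1 h.2)
  rw [mergeSubset_eq_all_contains _ _ hcs hts,
      partial_dict_match_A_eq_all_contains c t ht, hpc.all_eq]
  have hall : ∀ p : String × Int, t.contains p = (sortItems t).contains p := by
    intro p
    rw [Bool.eq_iff_iff]
    simp only [List.contains_iff_mem]
    exact hpt.mem_iff.symm
  simp only [hall]

-- Outer loop: the early-return scan equals the all/any expression over the
-- precomputed sorted targets.
theorem outer_eq (cl tl : List (List (String × Int)))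
    (hpre : ∀ d ∈ tl, (d.map Prod.fst).Nodup) :
    partial_dict_list_match cl tl = partial_dict_list_match_alt cl tl := by
  induction cl with
  | nil => rfl
  | cons c rest ih =>
      simp only [partial_dict_list_match, partial_dict_list_match_alt, List.all_cons]
      have hmap : tl.map (fun t => partial_dict_match_A c t)
          = tl.map (fun t => mergeSubset (sortItems c) (sortItems t)) :=
        List.map_congr_left (fun t hmem => inner_eq c t (hpre t hmem))
      have key : ∀ (x y : Bool), (if !x then false else y) = (x && y) := by decide
      rw [hmap, List.any_map, key]
      rw [ih]
      simp only [partial_dict_list_match_alt, List.any_map]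
      rfl

theorem partial_dict_list_match_spec : Claim_equal_partial_dict_list_match := by
  intro cl tl _ hpre
  exact outer_eq cl tl hpre
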